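-- pv_equiv track=rewrite | github.com/deekshitakacham/6.009-Lab-6 | lab.py | rule_two
-- ===== SOURCE A (Python) =====
-- def group_combinations(students, group):
--     """
--     Given students, which is a dictionary of the students, and
--     the size of their group, returns the combinations of
--     the students of that group size
--     """
--
--     if group == 1:
--         result1 = []
--         for student in students:
--             result1.append([student])
--         return result1
--
--     else:
--         result2 = []
--         for i in range(len(students)):
--             smaller_list = students[i+1:]
--             for left_over in group_combinations(smaller_list, group-1):
--                 result2.append([students[i]]+left_over)
--
--         return result2
--
-- def rule_two(student_preferences, room_capacities):
--     """
--     Implements the second rule, which, given student_preferences and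
--     room_capacities, guarantees that each student is put into one room
--     but no more than 1 student per room. Essentially gets all combinations
--     and assigns them with False.
--     """
--     result = []
--     dict_list = student_preferences.items()
--
--     room_slots = list(room_capacities.keys())
--     #names = student_preferences.keys()
--
--     for i in dict_list:
--         #find all groups of 2
--         groups_of_2 = group_combinations(room_slots, 2)
--
--         for rooms in groups_of_2:
--
--             inner = []
--
--             for room in rooms:
--
--                 slot = ((i[0]+'_'+room, False))
--
--                 inner.append(slot)
--
--             result.append(inner)
--
--     return result
-- ===== SOURCE B (Python) =====
-- def rule_two(student_preferences, room_capacities):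
--     """
--     Same rule: each student paired with every unordered pair of rooms,
--     each slot marked False.
--     """
--     pairs = []
--     rest = list(room_capacities)
--     while rest:
--         a = rest[0]
--         rest = rest[1:]
--         for b in rest:
--             pairs.append((a, b))
--     return [[(name + '_' + a, False), (name + '_' + b, False)]
--             for name in student_preferences
--             for (a, b) in pairs]
-- ===== Notes on version B (the rewrite author's own statement) =====
-- stated objective: alternative
-- what changed: Replaces the recursive group_combinations helper (recomputed per student) with a single suffix-scan that builds the room-pair list once, then emits all rows with one comprehension over student names.
import Mathlib
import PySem

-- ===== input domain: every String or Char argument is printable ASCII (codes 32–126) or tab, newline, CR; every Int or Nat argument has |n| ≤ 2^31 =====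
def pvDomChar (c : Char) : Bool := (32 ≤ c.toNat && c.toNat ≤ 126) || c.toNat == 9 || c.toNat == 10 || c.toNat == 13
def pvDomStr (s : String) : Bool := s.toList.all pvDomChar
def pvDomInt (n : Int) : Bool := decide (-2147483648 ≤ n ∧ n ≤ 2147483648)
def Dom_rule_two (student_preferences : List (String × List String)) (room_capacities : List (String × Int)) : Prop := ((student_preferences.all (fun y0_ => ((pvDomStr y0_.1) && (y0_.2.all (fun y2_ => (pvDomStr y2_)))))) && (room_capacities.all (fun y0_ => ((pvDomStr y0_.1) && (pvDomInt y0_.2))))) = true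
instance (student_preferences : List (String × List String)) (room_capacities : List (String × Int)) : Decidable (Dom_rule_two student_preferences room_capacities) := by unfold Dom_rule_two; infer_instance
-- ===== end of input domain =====

-- B computes the room-pair list once by a suffix scan instead of calling the recursive
-- group_combinations helper anew for every student, then emits all rows in one pass.

-- ===== PORT A =====
-- literal port of group_combinations (the index loop over students with students[i+1:]
-- becomes the structural recursion on the same suffixes, in the same order)
def group_combinations (students : List String) (group : Int) : List (List String) :=
  if group = 1 then
    students.foldl (fun result1 student => result1 ++ [[student]]) []
  else
    match students with
    | [] => []
    | s :: rest =>
        (group_combinations rest (group - 1)).foldl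
          (fun result2 left_over => result2 ++ [s :: left_over])
          [] ++ group_combinations rest group

def rule_two (student_preferences : List (String × List String)) (room_capacities : List (String × Int)) : List (List (String × Bool)) :=
  let dict_list := (PySem.Dict.ofList student_preferences).items
  let room_slots := (PySem.Dict.ofList room_capacities).keys
  dict_list.foldl (fun result i =>
    let groups_of_2 := group_combinations room_slots 2
    groups_of_2.foldl (fun result rooms =>
      let inner := rooms.foldl (fun inner room => inner ++ [(i.1 ++ "_" ++ room, false)]) []
      result ++ [inner]) result) []

-- ===== PORT B =====
-- the while loop of Source B peeling rest[0] from rest, appending (a, b) for each later b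
def pairsOf : List String → List (String × String)
  | [] => []
  | a :: rest => rest.foldl (fun pairs b => pairs ++ [(a, b)]) [] ++ pairsOf rest

def rule_two_alt (student_preferences : List (String × List String)) (room_capacities : List (String × Int)) : List (List (String × Bool)) :=
  let pairs := pairsOf ((PySem.Dict.ofList room_capacities).keys)
  ((PySem.Dict.ofList student_preferences).keys).flatMap (fun name =>
    pairs.map (fun p => [(name ++ "_" ++ p.1, false), (name ++ "_" ++ p.2, false)]))

-- ===== PRECONDITION & SPEC =====
def Spec_rule_two (student_preferences : List (String × List String)) (room_capacities : List (String × Int)) (out : List (List (String × Bool))) : Prop := out = rule_two_alt student_preferences room_capacities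
instance (student_preferences : List (String × List String)) (room_capacities : List (String × Int)) (out : List (List (String × Bool))) : Decidable (Spec_rule_two student_preferences room_capacities out) := by unfold Spec_rule_two; infer_instance

-- ===== CLAIM (what is proved, stated in full; the proofs are below) =====
def Claim_equal_rule_two : Prop := ∀ (student_preferences : List (String × List String)) (room_capacities : List (String × Int)), Dom_rule_two student_preferences room_capacities → Spec_rule_two student_preferences room_capacities (rule_two student_preferences room_capacities)

-- ===== LEMMAS AND PROOFS =====

theorem flatMap_sing_sing (l : List String) :
    l.flatMap (fun x => [[x]]) = l.map (fun s => [s]) := by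
  induction l <;> simp [*]

theorem gc_one (l : List String) :
    group_combinations l 1 = l.map (fun s => [s]) := by
  cases l <;> simp [group_combinations, ← List.flatMap_def, flatMap_sing_sing]

-- A's groups of 2 are exactly B's pair list, each pair written as a two-element list
theorem gc_two_eq_pairsOf (l : List String) :
    group_combinations l 2 = (pairsOf l).map (fun p => [p.1, p.2]) := by
  induction l with
  | nil => simp [group_combinations, pairsOf]
  | cons a rest ih =>
      simp [group_combinations, pairsOf, gc_one, ih, List.map_map, Function.comp_def]

theorem rule_two_spec_aux (student_preferences : List (String × List String)) (room_capacities : List (String × Int)) :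
    rule_two student_preferences room_capacities = rule_two_alt student_preferences room_capacities := by
  unfold rule_two rule_two_alt
  simp only [PySem.Dict.keys, PySem.List.foldl_append_singleton_eq_map,
    PySem.List.foldl_append_eq_flatMap, List.nil_append, List.flatMap_map]
  congr 1
  funext i
  simp [gc_two_eq_pairsOf, List.map_map, Function.comp]

-- ===== VERDICT (by name: the statement is the Claim_ definition above) =====
theorem rule_two_spec : Claim_equal_rule_two := by
  intro sp rc _
  exact rule_two_spec_aux sp rc
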